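-- pv_equiv track=rewrite | github.com/Deek0326/snowflake-cortex-squadron-ai-assistant | snowflake-cortex-squadron-ai-assistant/src/squadron_ai/snowflake_client.py | _normalize_cortex_sql
-- ===== SOURCE A (Python) =====
-- def _normalize_cortex_sql(sql: str) -> str:
--     replacements = {
--         "__missions": "MISSIONS",
--         "__aircraft_readiness": "AIRCRAFT_READINESS",
--         "__incident_reports": "INCIDENT_REPORTS",
--         "__parts_inventory": "PARTS_INVENTORY",
--         "__personnel_availability": "PERSONNEL_AVAILABILITY",
--     }
--     normalized = sql
--     for logical_name, table_name in replacements.items():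
--         normalized = normalized.replace(logical_name, table_name)
--     normalized = normalized.replace("success_indicator", "IFF(success_flag, 1, 0)")
--     return normalized
-- ===== SOURCE B (Python) =====
-- _REPLACEMENTS = {
--     "__missions": "MISSIONS",
--     "__aircraft_readiness": "AIRCRAFT_READINESS",
--     "__incident_reports": "INCIDENT_REPORTS",
--     "__parts_inventory": "PARTS_INVENTORY",
--     "__personnel_availability": "PERSONNEL_AVAILABILITY",
--     "success_indicator": "IFF(success_flag, 1, 0)",
-- }
--
--
-- def _normalize_cortex_sql(sql: str) -> str:
--     # One left-to-right scan: at each position try every key; no key is a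
--     # prefix of another and no replacement re-creates a key, so this equals
--     # the six sequential full-string passes.
--     out = []
--     i = 0
--     n = len(sql)
--     while i < n:
--         for key, val in _REPLACEMENTS.items():
--             if sql.startswith(key, i):
--                 out.append(val)
--                 i += len(key)
--                 break
--         else:
--             out.append(sql[i])
--             i += 1
--     return "".join(out)
-- ===== Notes on version B (the rewrite author's own statement) =====
-- stated objective: alternative
-- what changed: Replaces six sequential full-string .replace passes by one left-to-right scan that tries all six keys at each position (no key is a prefix of another and no replacement re-creates a key, so a single pass is exact).
import Mathlib
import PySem

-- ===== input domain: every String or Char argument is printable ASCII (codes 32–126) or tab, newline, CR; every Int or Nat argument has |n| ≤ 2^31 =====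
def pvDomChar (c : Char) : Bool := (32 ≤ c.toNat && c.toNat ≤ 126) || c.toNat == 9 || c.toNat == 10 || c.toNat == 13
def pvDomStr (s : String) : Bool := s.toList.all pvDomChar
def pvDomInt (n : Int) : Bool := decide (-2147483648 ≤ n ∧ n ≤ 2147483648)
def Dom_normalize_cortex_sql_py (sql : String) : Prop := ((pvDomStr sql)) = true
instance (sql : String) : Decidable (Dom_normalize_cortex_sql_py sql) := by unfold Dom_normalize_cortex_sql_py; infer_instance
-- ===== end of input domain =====

-- B replaces A's six sequential full-string .replace passes by one left-to-right scan
-- that tries every key at each position (objective: alternative single-pass algorithm).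

-- ===== PORT A =====
def normalize_cortex_sql_py (sql : String) : String :=
  let replacements : List (String × String) :=
    [("__missions", "MISSIONS"),
     ("__aircraft_readiness", "AIRCRAFT_READINESS"),
     ("__incident_reports", "INCIDENT_REPORTS"),
     ("__parts_inventory", "PARTS_INVENTORY"),
     ("__personnel_availability", "PERSONNEL_AVAILABILITY")]
  let normalized := sql
  let normalized := replacements.foldl
    (fun normalized kv => PySem.Str.replace normalized kv.1 kv.2) normalized
  let normalized := PySem.Str.replace normalized "success_indicator" "IFF(success_flag, 1, 0)"
  normalized

-- ===== PORT B =====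
-- the replacement table of Source B, as (key, value) character lists
def pvRepl : List (List Char × List Char) :=
  [("__missions".toList, "MISSIONS".toList),
   ("__aircraft_readiness".toList, "AIRCRAFT_READINESS".toList),
   ("__incident_reports".toList, "INCIDENT_REPORTS".toList),
   ("__parts_inventory".toList, "PARTS_INVENTORY".toList),
   ("__personnel_availability".toList, "PERSONNEL_AVAILABILITY".toList),
   ("success_indicator".toList, "IFF(success_flag, 1, 0)".toList)]

-- Source B's while loop: at each position try the keys in table order; on a match
-- emit the value and skip the key, otherwise emit the character.
def pvScan (ks : List (List Char × List Char)) : List Char → List Char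
  | [] => []
  | c :: t =>
    match ks.find? (fun kv => kv.1.isPrefixOf (c :: t)) with
    | some kv => kv.2 ++ pvScan ks (t.drop (kv.1.length - 1))
    | none => c :: pvScan ks t
termination_by s => s.length
decreasing_by
  · simp
  · simp

def normalize_cortex_sql_py_alt (sql : String) : String :=
  String.ofList (pvScan pvRepl sql.toList)

-- ===== PRECONDITION & SPEC =====
def Spec_normalize_cortex_sql_py (sql : String) (out : String) : Prop := out = normalize_cortex_sql_py_alt sql
instance (sql : String) (out : String) : Decidable (Spec_normalize_cortex_sql_py sql out) := by unfold Spec_normalize_cortex_sql_py; infer_instance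

-- ===== CLAIM (what is proved, stated in full; the proofs are below) =====
def Claim_equal_normalize_cortex_sql_py : Prop := ∀ (sql : String), Dom_normalize_cortex_sql_py sql → Spec_normalize_cortex_sql_py sql (normalize_cortex_sql_py sql)

-- ===== LEMMAS AND PROOFS =====

theorem pvScan_nil (ks : List (List Char × List Char)) : pvScan ks [] = [] := by
  rw [pvScan]

theorem pvScan_cons_some {ks : List (List Char × List Char)} {c : Char} {t : List Char}
    {kv : List Char × List Char}
    (h : ks.find? (fun kv => kv.1.isPrefixOf (c :: t)) = some kv) :
    pvScan ks (c :: t) = kv.2 ++ pvScan ks (t.drop (kv.1.length - 1)) := by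
  rw [pvScan, h]

theorem pvScan_cons_none {ks : List (List Char × List Char)} {c : Char} {t : List Char}
    (h : ks.find? (fun kv => kv.1.isPrefixOf (c :: t)) = none) :
    pvScan ks (c :: t) = c :: pvScan ks t := by
  rw [pvScan, h]

-- a single Python str.replace with a nonempty pattern IS the one-key scan
theorem go_eq_scan1 (k v : List Char) (hk : k ≠ []) :
    ∀ (fuel : Nat) (l acc : List Char), l.length ≤ fuel →
      PySem.Chars.replace.go k v fuel l acc = acc.reverse ++ pvScan [(k, v)] l := by
  intro fuel
  induction fuel with
  | zero =>
    intro l acc hl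
    have : l = [] := by cases l <;> simp_all
    subst this
    simp [PySem.Chars.replace.go, pvScan_nil]
  | succ n ih =>
    intro l acc hl
    cases l with
    | nil => simp [PySem.Chars.replace.go, pvScan_nil]
    | cons c t =>
      by_cases hp : k.isPrefixOf (c :: t) = true
      · have hfind : ([(k, v)]).find? (fun kv => kv.1.isPrefixOf (c :: t)) = some (k, v) := by
          simp [List.find?, hp]
        obtain ⟨m, hm⟩ : ∃ m, k.length = m + 1 := by
          cases k with
          | nil => exact absurd rfl hk
          | cons a b => exact ⟨b.length, rfl⟩
        have hdrop : (c :: t).drop k.length = t.drop (k.length - 1) := by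
          rw [hm]; simp
        rw [pvScan_cons_some hfind]
        simp only [PySem.Chars.replace.go, hp, if_true]
        rw [hdrop, ih (t.drop (k.length - 1)) (v.reverse ++ acc) (by simp at hl ⊢; omega)]
        simp
      · have hp' : k.isPrefixOf (c :: t) = false := Bool.eq_false_iff.mpr hp
        have hfind : ([(k, v)]).find? (fun kv => kv.1.isPrefixOf (c :: t)) = none := by
          simp [List.find?, hp']
        rw [pvScan_cons_none hfind]
        simp only [PySem.Chars.replace.go, hp', Bool.false_eq_true, if_false]
        rw [ih t (c :: acc) (by simp at hl ⊢; omega)]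
        simp

theorem replace_eq_scan1 (k v l : List Char) (hk : k ≠ []) :
    PySem.Chars.replace l k v = pvScan [(k, v)] l := by
  have h0 : k.isEmpty = false := by simp [hk]
  simp only [PySem.Chars.replace, h0, Bool.false_eq_true, if_false]
  simpa using go_eq_scan1 k v hk l.length l [] le_rfl

-- if no key matches at the first m positions, the scan passes m characters through
theorem pvScan_pass (ks : List (List Char × List Char)) (m : Nat) :
    ∀ s : List Char, (∀ i < m, ∀ kv ∈ ks, ¬ kv.1 <+: s.drop i) →
      pvScan ks s = s.take m ++ pvScan ks (s.drop m) := by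
  induction m with
  | zero => intro s _; simp
  | succ n ih =>
    intro s hs
    cases s with
    | nil => simp [pvScan_nil]
    | cons c t =>
      have hfind : ks.find? (fun kv => kv.1.isPrefixOf (c :: t)) = none := by
        rw [List.find?_eq_none]
        intro kv hkv
        simpa [List.isPrefixOf_iff_prefix] using hs 0 (Nat.succ_pos n) kv hkv
      rw [pvScan_cons_none hfind]
      have := ih t (by
        intro i hi kv hkv
        simpa using hs (i + 1) (by omega) kv hkv)
      rw [this]
      simp

-- if a suffix of k is not a prefix of s it is not a prefix of the scan of s either,
-- provided no suffix of k is compatible with any replacement value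
theorem pvScan_nopref (ks : List (List Char × List Char)) (k : List Char)
    (hC : ∀ j < k.length, ∀ kv ∈ ks, ¬ kv.2 <+: k.drop j ∧ ¬ k.drop j <+: kv.2) :
    ∀ (s : List Char) (j : Nat), j < k.length → ¬ k.drop j <+: s → ¬ k.drop j <+: pvScan ks s := by
  intro s
  induction s with
  | nil =>
    intro j hj _
    rw [pvScan_nil]
    intro h
    have := List.prefix_nil.mp h
    have : k.length - j = 0 := by rw [← List.length_drop, this]; rfl
    omega
  | cons c t ih =>
    intro j hj hns
    cases hfind : ks.find? (fun kv => kv.1.isPrefixOf (c :: t)) with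
    | some kv =>
      have hmem : kv ∈ ks := List.mem_of_find?_eq_some hfind
      rw [pvScan_cons_some hfind]
      intro h
      rcases List.prefix_or_prefix_of_prefix h (List.prefix_append kv.2 _) with h' | h'
      · exact (hC j hj kv hmem).2 h'
      · exact (hC j hj kv hmem).1 h'
    | none =>
      rw [pvScan_cons_none hfind]
      intro h
      have hdk : k.drop j = k[j] :: k.drop (j + 1) := List.drop_eq_getElem_cons hj
      rw [hdk] at h hns
      rw [List.cons_prefix_cons] at h
      obtain ⟨hc, h'⟩ := h
      by_cases hj1 : j + 1 < k.length
      · have hnt : ¬ k.drop (j + 1) <+: t := by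
          intro hq
          exact hns (by rw [List.cons_prefix_cons]; exact ⟨hc, hq⟩)
        exact ih (j + 1) hj1 hnt h'
      · have : k.drop (j + 1) = [] := by
          apply List.drop_eq_nil_of_le; omega
        exact hns (by rw [List.cons_prefix_cons, this]; exact ⟨hc, List.nil_prefix⟩)

-- the key step: appending one more replacement pass after the scan over ks
-- extends the scan by that key, under the concrete non-overlap conditions
theorem pvScan_step (ks : List (List Char × List Char)) (k v : List Char) (hk : k ≠ [])
    (hval : ∀ kv ∈ ks, ∀ i < kv.2.length, ¬ k <+: kv.2.drop i ∧ ¬ kv.2.drop i <+: k)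
    (hkey : ∀ j < k.length, 0 < j → ∀ kv ∈ ks, ¬ kv.1 <+: k.drop j ∧ ¬ k.drop j <+: kv.1)
    (hvalk : ∀ j < k.length, ∀ kv ∈ ks, ¬ kv.2 <+: k.drop j ∧ ¬ k.drop j <+: kv.2) :
    ∀ s : List Char, pvScan [(k, v)] (pvScan ks s) = pvScan (ks ++ [(k, v)]) s := by
  have main : ∀ (n : Nat) (s : List Char), s.length ≤ n →
      pvScan [(k, v)] (pvScan ks s) = pvScan (ks ++ [(k, v)]) s := by
    intro n
    induction n with
    | zero =>
      intro s hs
      have : s = [] := by cases s <;> simp_all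
      subst this
      simp [pvScan_nil]
    | succ n ih =>
      intro s hs
      cases s with
      | nil => simp [pvScan_nil]
      | cons c t =>
        have hlt : t.length ≤ n := by simp at hs; omega
        cases hfind : ks.find? (fun kv => kv.1.isPrefixOf (c :: t)) with
        | some kv =>
          have hmem : kv ∈ ks := List.mem_of_find?_eq_some hfind
          have hfind' : (ks ++ [(k, v)]).find? (fun kv => kv.1.isPrefixOf (c :: t)) = some kv := by
            rw [List.find?_append, hfind]; rfl
          rw [pvScan_cons_some hfind, pvScan_cons_some hfind']
          set X := pvScan ks (t.drop (kv.1.length - 1)) with hX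
          have hpass : pvScan [(k, v)] (kv.2 ++ X) = kv.2 ++ pvScan [(k, v)] X := by
            have := pvScan_pass [(k, v)] kv.2.length (kv.2 ++ X) (by
              intro i hi kv' hkv'
              simp at hkv'
              subst hkv'
              rw [List.drop_append_of_le_length (le_of_lt hi)]
              intro hpre
              rcases List.prefix_or_prefix_of_prefix hpre (List.prefix_append (kv.2.drop i) X) with h' | h'
              · exact (hval kv hmem i hi).1 h'
              · exact (hval kv hmem i hi).2 h')
            rw [this, List.take_left, List.drop_left]
          rw [hpass, hX, ih (t.drop (kv.1.length - 1)) (by simp; omega)]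
        | none =>
          have hnone : ∀ kv ∈ ks, ¬ kv.1 <+: (c :: t) := by
            intro kv hkv
            have := List.find?_eq_none.mp hfind kv hkv
            simpa [List.isPrefixOf_iff_prefix] using this
          by_cases hpre : k <+: (c :: t)
          · -- the new key matches here: scan over ks passes k through untouched
            obtain ⟨rest, hrest⟩ := hpre
            have hpassks : pvScan ks (c :: t) = k ++ pvScan ks ((c :: t).drop k.length) := by
              have := pvScan_pass ks k.length (c :: t) (by
                intro i hi kv hkv
                rcases Nat.eq_zero_or_pos i with hi0 | hi0
                · subst hi0; simpa using hnone kv hkv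
                · rw [← hrest, List.drop_append_of_le_length (le_of_lt hi)]
                  intro hq
                  rcases List.prefix_or_prefix_of_prefix hq (List.prefix_append (k.drop i) rest) with h' | h'
                  · exact (hkey i hi hi0 kv hkv).1 h'
                  · exact (hkey i hi hi0 kv hkv).2 h')
              rw [this, ← hrest, List.take_left]
            obtain ⟨m, hm⟩ : ∃ m, k.length = m + 1 := by
              cases k with
              | nil => exact absurd rfl hk
              | cons a b => exact ⟨b.length, rfl⟩
            -- unfold the one-key scan on k ++ Y
            have hscan1 : ∀ Y : List Char, pvScan [(k, v)] (k ++ Y) = v ++ pvScan [(k, v)] Y := by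
              intro Y
              obtain ⟨a, b, hkk⟩ : ∃ a b, k = a :: b := by
                cases k with
                | nil => exact absurd rfl hk
                | cons a b => exact ⟨a, b, rfl⟩
              have hp1 : k.isPrefixOf (a :: (b ++ Y)) = true := by
                rw [List.isPrefixOf_iff_prefix, hkk]
                exact (List.cons_prefix_cons).mpr ⟨rfl, List.prefix_append b Y⟩
              have hfind1 : ([(k, v)]).find? (fun kv => kv.1.isPrefixOf (a :: (b ++ Y))) = some (k, v) := by
                simp [List.find?, hp1]
              calc pvScan [(k, v)] (k ++ Y) = pvScan [(k, v)] (a :: (b ++ Y)) := by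
                    rw [hkk]; simp
                _ = v ++ pvScan [(k, v)] ((b ++ Y).drop (k.length - 1)) := pvScan_cons_some hfind1
                _ = v ++ pvScan [(k, v)] Y := by rw [hkk]; simp
            rw [hpassks, hscan1]
            have hdrop1 : (c :: t).drop k.length = t.drop (k.length - 1) := by rw [hm]; simp
            have hfind' : (ks ++ [(k, v)]).find? (fun kv => kv.1.isPrefixOf (c :: t)) = some (k, v) := by
              rw [List.find?_append, List.find?_eq_none.mpr (by
                intro kv hkv
                simpa [List.isPrefixOf_iff_prefix] using hnone kv hkv)]
              have hp1 : k.isPrefixOf (c :: t) = true := by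
                rw [List.isPrefixOf_iff_prefix]; exact ⟨rest, hrest⟩
              simp [List.find?, hp1]
            rw [pvScan_cons_some hfind']
            congr 1
            rw [← hdrop1, ih ((c :: t).drop k.length) (by simp; omega)]
          · -- nothing matches at this position
            have hfindall : (ks ++ [(k, v)]).find? (fun kv => kv.1.isPrefixOf (c :: t)) = none := by
              rw [List.find?_eq_none]
              intro kv hkv
              simp at hkv
              rcases hkv with hkv | hkv
              · simpa [List.isPrefixOf_iff_prefix] using hnone kv hkv
              · rw [hkv]
                simpa [List.isPrefixOf_iff_prefix] using hpre
            rw [pvScan_cons_none hfind, pvScan_cons_none hfindall]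
            have hnop : ¬ k <+: (c :: pvScan ks t) := by
              have h0 : ¬ k.drop 0 <+: (c :: t) := by simpa using hpre
              have := pvScan_nopref ks k hvalk (c :: t) 0 (by
                cases k with
                | nil => exact absurd rfl hk
                | cons a b => simp) h0
              rw [pvScan_cons_none hfind] at this
              simpa using this
            have hb : k.isPrefixOf (c :: pvScan ks t) = false :=
              Bool.eq_false_iff.mpr (fun h => hnop (List.isPrefixOf_iff_prefix.mp h))
            have hfind1 : ([(k, v)]).find? (fun kv => kv.1.isPrefixOf (c :: pvScan ks t)) = none := by
              simp [List.find?, hb]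
            rw [pvScan_cons_none hfind1, ih t hlt]
  intro s
  exact main s.length s le_rfl

-- the full chain of six sequential replaces equals the six-key scan
theorem chain_eq_scan (l : List Char) :
    PySem.Chars.replace
      (PySem.Chars.replace
        (PySem.Chars.replace
          (PySem.Chars.replace
            (PySem.Chars.replace
              (PySem.Chars.replace l "__missions".toList "MISSIONS".toList)
              "__aircraft_readiness".toList "AIRCRAFT_READINESS".toList)
            "__incident_reports".toList "INCIDENT_REPORTS".toList)
          "__parts_inventory".toList "PARTS_INVENTORY".toList)
        "__personnel_availability".toList "PERSONNEL_AVAILABILITY".toList)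
      "success_indicator".toList "IFF(success_flag, 1, 0)".toList
    = pvScan pvRepl l := by
  have s2 := pvScan_step [("__missions".toList, "MISSIONS".toList)]
    "__aircraft_readiness".toList "AIRCRAFT_READINESS".toList
    (by decide) (by decide) (by decide) (by decide)
  have s3 := pvScan_step
    [("__missions".toList, "MISSIONS".toList),
     ("__aircraft_readiness".toList, "AIRCRAFT_READINESS".toList)]
    "__incident_reports".toList "INCIDENT_REPORTS".toList
    (by decide) (by decide) (by decide) (by decide)
  have s4 := pvScan_step
    [("__missions".toList, "MISSIONS".toList),
     ("__aircraft_readiness".toList, "AIRCRAFT_READINESS".toList),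
     ("__incident_reports".toList, "INCIDENT_REPORTS".toList)]
    "__parts_inventory".toList "PARTS_INVENTORY".toList
    (by decide) (by decide) (by decide) (by decide)
  have s5 := pvScan_step
    [("__missions".toList, "MISSIONS".toList),
     ("__aircraft_readiness".toList, "AIRCRAFT_READINESS".toList),
     ("__incident_reports".toList, "INCIDENT_REPORTS".toList),
     ("__parts_inventory".toList, "PARTS_INVENTORY".toList)]
    "__personnel_availability".toList "PERSONNEL_AVAILABILITY".toList
    (by decide) (by decide) (by decide) (by decide)
  have s6 := pvScan_step
    [("__missions".toList, "MISSIONS".toList),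
     ("__aircraft_readiness".toList, "AIRCRAFT_READINESS".toList),
     ("__incident_reports".toList, "INCIDENT_REPORTS".toList),
     ("__parts_inventory".toList, "PARTS_INVENTORY".toList),
     ("__personnel_availability".toList, "PERSONNEL_AVAILABILITY".toList)]
    "success_indicator".toList "IFF(success_flag, 1, 0)".toList
    (by decide) (by decide) (by decide) (by decide)
  simp only [List.cons_append, List.nil_append] at s2 s3 s4 s5 s6
  rw [replace_eq_scan1 _ _ _ (by decide)]
  rw [replace_eq_scan1 _ _ _ (by decide)]
  rw [replace_eq_scan1 _ _ _ (by decide)]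
  rw [replace_eq_scan1 _ _ _ (by decide)]
  rw [replace_eq_scan1 _ _ _ (by decide)]
  rw [replace_eq_scan1 _ _ _ (by decide)]
  rw [s2, s3, s4, s5, s6]
  rfl

-- ===== VERDICT (by name: the statement is the Claim_ definition above) =====
theorem normalize_cortex_sql_py_spec : Claim_equal_normalize_cortex_sql_py := by
  intro sql _
  show normalize_cortex_sql_py sql = normalize_cortex_sql_py_alt sql
  unfold normalize_cortex_sql_py normalize_cortex_sql_py_alt
  simp only [List.foldl, PySem.Str.replace, String.toList_ofList]
  exact congrArg String.ofList (chain_eq_scan sql.toList)
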